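-- pv_equiv track=rewrite | github.com/XiaoZhangYES/CognitionCapturerPro | src/cogcappro/data/meg.py | analyze_third_letters
-- ===== SOURCE A (Python) =====
-- def analyze_third_letters(channels):
--     """
--     Analyze the distribution of the third letter in MEG channel names
--
--     Args:
--         channels: List of channel names
--
--     Returns:
--         dict: Dictionary of third letters and their occurrence counts
--     """
--     third_letter_count = {}
--
--     for channel in channels:
--         if len(channel) >= 3:
--             third_letter = channel[2]
--             third_letter_count[third_letter] = third_letter_count.get(third_letter, 0) + 1
--
--     # Sort by alphabetical order
--     sorted_count = dict(sorted(third_letter_count.items()))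
--     return sorted_count
-- ===== SOURCE B (Python) =====
-- def analyze_third_letters(channels):
--     """
--     Analyze the distribution of the third letter in MEG channel names.
--
--     Sort the qualifying third letters first, then emit each run of equal
--     letters as one (letter, run-length) entry; the result dict is built
--     already in alphabetical key order.
--     """
--     letters = sorted(channel[2] for channel in channels if len(channel) >= 3)
--     result = {}
--     i = 0
--     n = len(letters)
--     while i < n:
--         j = i
--         while j < n and letters[j] == letters[i]:
--             j += 1
--         result[letters[i]] = j - i
--         i = j
--     return result
-- ===== Notes on version B (the rewrite author's own statement) =====
-- stated objective: alternative
-- what changed: Instead of incrementally counting letters into a dict and sorting its distinct keys at the end, B sorts the qualifying third letters once and emits each run of equal letters as a single (letter, run-length) entry, building the result dict already in alphabetical key order.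
import Mathlib
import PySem

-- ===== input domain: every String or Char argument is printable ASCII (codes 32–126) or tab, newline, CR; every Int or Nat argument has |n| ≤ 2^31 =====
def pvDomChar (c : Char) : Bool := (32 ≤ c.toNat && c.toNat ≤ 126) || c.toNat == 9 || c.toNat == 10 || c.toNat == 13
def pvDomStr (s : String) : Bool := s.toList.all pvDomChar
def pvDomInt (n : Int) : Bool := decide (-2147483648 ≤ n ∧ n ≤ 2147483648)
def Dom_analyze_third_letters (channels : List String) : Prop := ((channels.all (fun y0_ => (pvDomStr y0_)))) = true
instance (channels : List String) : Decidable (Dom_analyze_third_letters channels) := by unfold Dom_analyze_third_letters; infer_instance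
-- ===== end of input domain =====

-- B replaces A's incremental dict counting + final key sort by sorting the
-- qualifying third letters once and emitting each run of equal letters as one
-- (letter, run-length) entry (objective: alternative single grouped pass).

-- ===== PORT A =====
def analyze_third_letters (channels : List String) : List (String × Int) :=
  let third_letter_count : PySem.Dict String Int :=
    channels.foldl (fun d channel =>
      if 3 ≤ PySem.Str.len channel then
        match PySem.Str.pyGet? channel 2 with
        | some third_letter =>
          d.insert (String.ofList [third_letter]) (d.getD (String.ofList [third_letter]) 0 + 1)
        | none => d   -- unreachable: len(channel) ≥ 3 puts index 2 in range
      else d) PySem.Dict.empty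
  -- dict keys are distinct, so Python's tuple sort of .items() is the stable sort by key
  PySem.List.sorted third_letter_count.items (fun p => p.1)

-- ===== PORT B =====
-- the inner while-loop of Source B: one run of equal letters at the front, then recurse
def pvRuns : List Char → List (String × Int)
  | [] => []
  | c :: rest =>
    (String.ofList [c], ((1 + (rest.takeWhile (· == c)).length : Nat) : Int))
      :: pvRuns (rest.dropWhile (· == c))
termination_by l => l.length
decreasing_by
  exact Nat.lt_succ_of_le (List.length_dropWhile_le (fun x => x == c) rest)

def analyze_third_letters_alt (channels : List String) : List (String × Int) :=
  let letters := PySem.List.sorted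
    (channels.filterMap (fun channel =>
      if 3 ≤ PySem.Str.len channel then PySem.Str.pyGet? channel 2 else none))
    id
  pvRuns letters

-- ===== PRECONDITION & SPEC =====
def Spec_analyze_third_letters (channels : List String) (out : List (String × Int)) : Prop := out = analyze_third_letters_alt channels
instance (channels : List String) (out : List (String × Int)) : Decidable (Spec_analyze_third_letters channels out) := by unfold Spec_analyze_third_letters; infer_instance

-- ===== CLAIM (what is proved, stated in full; the proofs are below) =====
def Claim_equal_analyze_third_letters : Prop := ∀ (channels : List String), Dom_analyze_third_letters channels → Spec_analyze_third_letters channels (analyze_third_letters channels)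

-- ===== LEMMAS AND PROOFS =====

-- the qualifying third letters, in input order
def pvLetters (channels : List String) : List Char :=
  channels.filterMap (fun channel =>
    if 3 ≤ PySem.Str.len channel then PySem.Str.pyGet? channel 2 else none)

-- the common normal form both ports are reduced to: distinct letters in
-- increasing order, each paired with its multiplicity among the letters
def pvCanon (L : List Char) : List (String × Int) :=
  (PySem.List.sorted (PySem.Set.ofList L) id).map
    (fun c => (String.ofList [c], (L.count c : Int)))

theorem pv_mkinj : Function.Injective (fun c : Char => String.ofList [c]) := by
  intro a b h
  simpa using congrArg String.toList h

theorem pv_mk_lt {a b : Char} : String.ofList [a] < String.ofList [b] ↔ a < b := by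
  rw [String.lt_iff_toList_lt]
  simp
  constructor
  · rintro (_ | _) <;> first | assumption | simp_all
  · intro h; exact List.Lex.rel h

theorem pv_ofList_map_aux (L : List Char) (s : List String) (t : List Char)
    (hs : s = t.map (fun c : Char => String.ofList [c])) :
    List.foldl PySem.Set.add s (L.map (fun c : Char => String.ofList [c]))
      = (List.foldl PySem.Set.add t L).map (fun c : Char => String.ofList [c]) := by
  induction L generalizing s t with
  | nil => simpa using hs
  | cons c L ih =>
    simp only [List.map_cons, List.foldl_cons]
    apply ih
    subst hs
    simp [PySem.Set.add, List.mem_map_of_injective pv_mkinj]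
    split <;> simp

theorem pv_ofList_map (L : List Char) :
    PySem.Set.ofList (L.map (fun c : Char => String.ofList [c]))
      = (PySem.Set.ofList L).map (fun c : Char => String.ofList [c]) := by
  simpa [PySem.Set.ofList] using pv_ofList_map_aux L [] [] rfl

theorem pv_pairwise_lt_sortedSet (L : List Char) :
    List.Pairwise (· < ·) (PySem.List.sorted (PySem.Set.ofList L) id) := by
  have h1 := PySem.List.sorted_pairwise (PySem.Set.ofList L) (id : Char → Char)
  have h2 : (PySem.List.sorted (PySem.Set.ofList L) id).Nodup :=
    (PySem.List.sorted_perm (PySem.Set.ofList L) id false).symm.nodup (PySem.Set.nodup_ofList L)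
  exact (h1.and h2).imp (fun h => lt_of_le_of_ne h.1 h.2)

theorem pv_sortedSet_congr {l L : List Char} (h : ∀ x, x ∈ l ↔ x ∈ L) :
    PySem.List.sorted (PySem.Set.ofList l) id
      = PySem.List.sorted (PySem.Set.ofList L) id := by
  apply PySem.List.sorted_eq_of_perm_of_pairwise_lt
  · refine (PySem.List.sorted_perm (PySem.Set.ofList L) id false).trans ?_
    refine (List.perm_ext_iff_of_nodup (PySem.Set.nodup_ofList L) (PySem.Set.nodup_ofList l)).2 ?_
    intro x
    rw [PySem.Set.mem_ofList, PySem.Set.mem_ofList]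
    exact (h x).symm
  · exact pv_pairwise_lt_sortedSet L

theorem pv_foldA (channels : List String) (d : PySem.Dict String Int) :
    channels.foldl (fun d channel =>
      if 3 ≤ PySem.Str.len channel then
        match PySem.Str.pyGet? channel 2 with
        | some third_letter =>
          d.insert (String.ofList [third_letter]) (d.getD (String.ofList [third_letter]) 0 + 1)
        | none => d
      else d) d
    = (pvLetters channels).foldl (fun d c =>
        d.insert (String.ofList [c]) (d.getD (String.ofList [c]) 0 + 1)) d := by
  unfold pvLetters
  rw [List.foldl_filterMap]
  congr 1
  funext d ch
  by_cases hg : 3 ≤ PySem.Str.len ch <;> simp only [hg, if_true, if_false] <;>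
    cases PySem.Str.pyGet? ch 2 <;> rfl

theorem pv_fold_insert (L : List Char) :
    List.foldl (fun d c => d.insert (String.ofList [c]) (d.getD (String.ofList [c]) 0 + 1))
      PySem.Dict.empty L
    = PySem.Dict.counter (L.map (fun c : Char => String.ofList [c])) := by
  rw [← PySem.Dict.foldl_insert_getD_add_one_eq_counter, List.foldl_map]

theorem pv_A_canon (channels : List String) :
    analyze_third_letters channels = pvCanon (pvLetters channels) := by
  have h0 : analyze_third_letters channels
      = PySem.List.sorted
          (PySem.Dict.counter ((pvLetters channels).map (fun c : Char => String.ofList [c]))).items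
          (fun p => p.1) := by
    unfold analyze_third_letters
    rw [pv_foldA, pv_fold_insert]
  rw [h0, PySem.Dict.items_counter, pv_ofList_map, List.map_map]
  apply PySem.List.sorted_eq_of_perm_of_pairwise_lt
  · have h2 : (PySem.Set.ofList (pvLetters channels)).map
        ((fun k => (k, (List.count k ((pvLetters channels).map (fun c : Char => String.ofList [c])) : Int)))
          ∘ (fun c : Char => String.ofList [c]))
        = (PySem.Set.ofList (pvLetters channels)).map
            (fun c : Char => (String.ofList [c], ((pvLetters channels).count c : Int))) := by
      refine List.map_congr_left (fun c _ => ?_)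
      simp [Function.comp, List.count_map_of_injective (pvLetters channels) _ pv_mkinj]
    rw [h2]
    exact (PySem.List.sorted_perm (PySem.Set.ofList (pvLetters channels)) id false).map _
  · unfold pvCanon
    rw [List.pairwise_map]
    exact (pv_pairwise_lt_sortedSet (pvLetters channels)).imp (fun h => pv_mk_lt.2 h)

theorem pv_runs_canon (l : List Char) (h : List.Pairwise (· ≤ ·) l) :
    pvRuns l = (PySem.List.sorted (PySem.Set.ofList l) id).map
      (fun c => (String.ofList [c], (l.count c : Int))) := by
  induction l using pvRuns.induct with
  | case1 => simp only [pvRuns]; rfl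
  | case2 c rest ih =>
    have hc : ∀ x ∈ rest, c ≤ x := fun x hx => (List.pairwise_cons.1 h).1 x hx
    have hr : List.Pairwise (· ≤ ·) rest := (List.pairwise_cons.1 h).2
    have hsplit : rest.takeWhile (· == c) ++ rest.dropWhile (· == c) = rest :=
      List.takeWhile_append_dropWhile
    have hrun : ∀ x ∈ rest.takeWhile (· == c), x = c := by
      intro x hx
      have hb := List.mem_takeWhile_imp (p := (· == c)) hx
      exact eq_of_beq hb
    have hr' : List.Pairwise (· ≤ ·) (rest.dropWhile (· == c)) :=
      List.Pairwise.sublist ((List.dropWhile_suffix (· == c)).sublist) hr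
    have hgt : ∀ x ∈ rest.dropWhile (· == c), c < x := by
      intro x hx
      cases hd : rest.dropWhile (· == c) with
      | nil => rw [hd] at hx; exact absurd hx (List.not_mem_nil)
      | cons y t =>
        have hne : rest.dropWhile (· == c) ≠ [] := by rw [hd]; exact List.cons_ne_nil y t
        have hhead := List.head_dropWhile_not (· == c) hne
        have hpy : (y == c) = false := by
          have hy : (rest.dropWhile (· == c)).head hne = y := by
            simp [hd]
          rwa [hy] at hhead
        have hymem : y ∈ rest.dropWhile (· == c) := by rw [hd]; exact List.mem_cons_self
        have hyrest : y ∈ rest := (List.dropWhile_suffix (· == c)).subset hymem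
        have hcy : c < y := lt_of_le_of_ne (hc y hyrest) (by
          intro hcontra
          simp [← hcontra] at hpy)
        have hrd : List.Pairwise (· ≤ ·) (y :: t) := hd ▸
          List.Pairwise.sublist ((List.dropWhile_suffix (· == c)).sublist) hr
        rw [hd] at hx
        rcases List.mem_cons.1 hx with h1 | h1
        · exact h1 ▸ hcy
        · exact lt_of_lt_of_le hcy ((List.pairwise_cons.1 hrd).1 x h1)
    have hcnot : c ∉ rest.dropWhile (· == c) := fun hmem => lt_irrefl c (hgt c hmem)
    -- membership characterisation of c :: rest
    have hmemchar : ∀ x : Char, x ∈ c :: rest ↔ x = c ∨ x ∈ rest.dropWhile (· == c) := by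
      intro x
      constructor
      · intro hx
        rcases List.mem_cons.1 hx with h1 | h1
        · exact Or.inl h1
        · rcases List.mem_append.1 (hsplit ▸ h1) with h2 | h2
          · exact Or.inl (hrun x h2)
          · exact Or.inr h2
      · rintro (h1 | h1)
        · exact h1 ▸ List.mem_cons_self
        · exact List.mem_cons_of_mem c ((List.dropWhile_suffix (· == c)).subset h1)
    -- the sorted distinct letters of c :: rest
    have hset : PySem.List.sorted (PySem.Set.ofList (c :: rest)) id
        = c :: PySem.List.sorted (PySem.Set.ofList (rest.dropWhile (· == c))) id := by
      apply PySem.List.sorted_eq_of_perm_of_pairwise_lt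
      · have hnd2 : (c :: PySem.List.sorted (PySem.Set.ofList (rest.dropWhile (· == c))) id).Nodup := by
          refine List.nodup_cons.2 ⟨?_, ?_⟩
          · intro hmem
            exact hcnot ((PySem.Set.mem_ofList _ c).1
              ((PySem.List.sorted_perm _ id false).subset hmem))
          · exact (PySem.List.sorted_perm _ id false).symm.nodup (PySem.Set.nodup_ofList _)
        refine (List.perm_ext_iff_of_nodup hnd2 (PySem.Set.nodup_ofList _)).2 ?_
        intro x
        rw [PySem.Set.mem_ofList, hmemchar x, List.mem_cons,
          (PySem.List.sorted_perm _ id false).mem_iff, PySem.Set.mem_ofList]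
      · refine List.pairwise_cons.2 ⟨?_, pv_pairwise_lt_sortedSet _⟩
        intro x hx
        exact hgt x ((PySem.Set.mem_ofList _ x).1 ((PySem.List.sorted_perm _ id false).subset hx))
    -- counts
    have hcount_c : (c :: rest).count c = 1 + (rest.takeWhile (· == c)).length := by
      rw [List.count_cons_self]
      conv_lhs => rw [← hsplit]
      rw [List.count_append]
      have h1 : (rest.takeWhile (· == c)).count c = (rest.takeWhile (· == c)).length :=
        List.count_eq_length.2 (fun b hb => (hrun b hb).symm)
      have h2 : (rest.dropWhile (· == c)).count c = 0 := List.count_eq_zero.2 hcnot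
      omega
    have hcount_tl : ∀ x ∈ rest.dropWhile (· == c),
        (c :: rest).count x = (rest.dropWhile (· == c)).count x := by
      intro x hx
      have hxc : x ≠ c := fun hxc => lt_irrefl c (hxc ▸ hgt x hx)
      rw [List.count_cons]
      conv_lhs => rw [← hsplit]
      rw [List.count_append]
      have h1 : (rest.takeWhile (· == c)).count x = 0 :=
        List.count_eq_zero.2 (fun hmem => hxc (hrun x hmem))
      simp [h1]
      exact fun hh => hxc hh.symm
    rw [pvRuns]
    rw [hset, List.map_cons, hcount_c]
    congr 1
    rw [ih hr']
    refine List.map_congr_left (fun x hx => ?_)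
    have hxmem : x ∈ rest.dropWhile (· == c) :=
      (PySem.Set.mem_ofList _ x).1 ((PySem.List.sorted_perm _ id false).subset hx)
    rw [hcount_tl x hxmem]

theorem pv_B_canon (channels : List String) :
    analyze_third_letters_alt channels = pvCanon (pvLetters channels) := by
  show pvRuns (PySem.List.sorted (pvLetters channels) id) = pvCanon (pvLetters channels)
  have hperm : (PySem.List.sorted (pvLetters channels) id).Perm (pvLetters channels) :=
    PySem.List.sorted_perm (pvLetters channels) id false
  have hpw : List.Pairwise (· ≤ ·) (PySem.List.sorted (pvLetters channels) id) := by
    simpa using PySem.List.sorted_pairwise (pvLetters channels) (id : Char → Char)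
  rw [pv_runs_canon _ hpw, pv_sortedSet_congr (fun x => hperm.mem_iff)]
  unfold pvCanon
  refine List.map_congr_left (fun x _ => ?_)
  rw [hperm.count_eq]

-- ===== VERDICT (by name: the statement is the Claim_ definition above) =====
theorem analyze_third_letters_spec : Claim_equal_analyze_third_letters := by
  intro channels _
  unfold Spec_analyze_third_letters
  rw [pv_A_canon, pv_B_canon]
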